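-- pv_equiv track=rewrite | github.com/FrancoARossi/SySdL-TPs | pruebas.py | a_SimbUnico
-- ===== SOURCE A (Python) =====
-- def a_SimbUnico(word):
-- 	s = 0
-- 	for c in word:
-- 		if s == 0 and (c == '<' or c == '>' or c == ':' or c == '!' or c == '='):
-- 			s = 1
-- 		else:
-- 			s = -1
-- 			break
-- 	return (s == 1)
-- ===== SOURCE B (Python) =====
-- def a_SimbUnico(word):
--     return len(word) == 1 and word[0] in ('<', '>', ':', '!', '=')
-- ===== Notes on version B (the rewrite author's own statement) =====
-- stated objective: simpler
-- what changed: Replaced the for-loop state machine (state 0/1/-1 with break) by a closed form: length == 1 and the single character's membership in the allowed-symbol tuple.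
import Mathlib
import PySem

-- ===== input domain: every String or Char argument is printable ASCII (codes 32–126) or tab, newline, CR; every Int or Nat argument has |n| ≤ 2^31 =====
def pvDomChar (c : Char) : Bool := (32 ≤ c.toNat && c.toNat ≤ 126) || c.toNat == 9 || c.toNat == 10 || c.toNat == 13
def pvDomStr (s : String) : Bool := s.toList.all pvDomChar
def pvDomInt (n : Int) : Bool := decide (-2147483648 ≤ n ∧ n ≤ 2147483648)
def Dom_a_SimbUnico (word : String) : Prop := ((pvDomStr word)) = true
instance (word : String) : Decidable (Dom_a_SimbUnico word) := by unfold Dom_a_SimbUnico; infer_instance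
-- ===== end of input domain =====

-- B replaces A's loop state machine by a closed form (length-1 + membership); objective: simpler.


-- ===== PORT A =====
-- the for-loop with break: state s, stop as soon as s is set to -1
def a_SimbUnicoLoop (s : Int) : List Char → Int
  | [] => s
  | c :: rest =>
    if s == 0 && (c == '<' || c == '>' || c == ':' || c == '!' || c == '=') then
      a_SimbUnicoLoop 1 rest
    else
      (-1)  -- s = -1; break

def a_SimbUnico (word : String) : Bool :=
  a_SimbUnicoLoop 0 word.toList == 1

-- ===== PORT B =====
def a_SimbUnico_alt (word : String) : Bool :=
  match word.toList with
  | [c] => c == '<' || c == '>' || c == ':' || c == '!' || c == '='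
  | _ => false

-- ===== PRECONDITION & SPEC =====
def Spec_a_SimbUnico (word : String) (out : Bool) : Prop := out = a_SimbUnico_alt word
instance (word : String) (out : Bool) : Decidable (Spec_a_SimbUnico word out) := by unfold Spec_a_SimbUnico; infer_instance

-- ===== CLAIM (what is proved, stated in full; the proofs are below) =====
def Claim_equal_a_SimbUnico : Prop := ∀ (word : String), Dom_a_SimbUnico word → Spec_a_SimbUnico word (a_SimbUnico word)

-- ===== LEMMAS AND PROOFS =====
-- ===== VERDICT (by name: the statement is the Claim_ definition above) =====
theorem a_SimbUnico_spec : Claim_equal_a_SimbUnico := by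
  intro word _
  unfold Spec_a_SimbUnico a_SimbUnico a_SimbUnico_alt
  cases h : word.toList with
  | nil => simp [a_SimbUnicoLoop]
  | cons c rest =>
    cases rest with
    | nil =>
      simp only [a_SimbUnicoLoop]
      by_cases hc : (c == '<' || c == '>' || c == ':' || c == '!' || c == '=') = true <;>
        simp [hc, a_SimbUnicoLoop]
    | cons d t =>
      simp only [a_SimbUnicoLoop]
      by_cases hc : (c == '<' || c == '>' || c == ':' || c == '!' || c == '=') = true <;>
        simp [hc]
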